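-- pv_equiv track=rewrite | github.com/lihaohong6/bilibili-tools | process_danmaku.py | build_cumulative_frequencies
-- ===== SOURCE A (Python) =====
-- def build_cumulative_frequencies(frequencies: dict[int, int]) -> list[int]:
--     keys = sorted(frequencies.keys())
--     start = keys[0]
--     end = keys[len(keys) - 1]
--     cumulative_frequencies: list[int] = [start]
--     for key in range(start, end + 1):
--         curr = cumulative_frequencies[len(cumulative_frequencies) - 1]
--         if key in frequencies:
--             curr += frequencies[key]
--         cumulative_frequencies.append(curr)
--     return cumulative_frequencies
-- ===== SOURCE B (Python) =====
-- def build_cumulative_frequencies(frequencies: dict[int, int]) -> list[int]: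
--     keys = sorted(frequencies)
--     start = keys[0]
--     out = [start]
--     total = start
--     for i, k in enumerate(keys):
--         total += frequencies[k]
--         nxt = keys[i + 1] if i + 1 < len(keys) else k + 1
--         out.extend([total] * (nxt - k))
--     return out
-- ===== Notes on version B (the rewrite author's own statement) =====
-- stated objective: alternative
-- what changed: A scans every integer in range(start, end+1) with a per-integer membership test and re-reads the last output element; B loops only over the n sorted present keys, looking each one up once and block-extending the output with [total]*(next_key - key) runs, so the per-integer dict probe disappears.
import Mathlib
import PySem

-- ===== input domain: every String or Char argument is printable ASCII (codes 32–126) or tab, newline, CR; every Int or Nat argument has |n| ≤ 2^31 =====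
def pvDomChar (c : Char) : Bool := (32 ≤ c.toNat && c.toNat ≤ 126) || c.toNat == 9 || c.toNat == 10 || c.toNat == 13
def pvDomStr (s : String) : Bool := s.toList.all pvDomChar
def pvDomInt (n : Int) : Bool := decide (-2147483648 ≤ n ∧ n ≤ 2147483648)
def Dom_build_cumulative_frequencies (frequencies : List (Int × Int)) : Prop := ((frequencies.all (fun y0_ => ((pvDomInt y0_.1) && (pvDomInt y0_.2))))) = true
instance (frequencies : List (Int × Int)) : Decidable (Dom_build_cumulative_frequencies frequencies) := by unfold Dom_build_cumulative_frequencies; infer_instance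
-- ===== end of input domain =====

-- B replaces A's per-integer scan of range(start, end+1) with a membership test at every
-- integer by a loop over the sorted PRESENT keys only, block-extending the output with the
-- run of equal cumulative values up to the next key; alternative decomposition, same result.
-- Both raise IndexError on the empty dict (excluded by Pre_).

-- ===== PORT A =====
def build_cumulative_frequencies (frequencies : List (Int × Int)) : List Int :=
  let d := PySem.Dict.ofList frequencies
  let keys := PySem.List.sorted (PySem.Dict.keys d) (fun x => x) false
  match PySem.List.pyGet? keys 0 with
  | none => []        -- Python raises IndexError here (empty dict); excluded by Pre_
  | some start =>
    let e := (PySem.List.pyGet? keys ((keys.length : Int) - 1)).getD 0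
    (PySem.List.pyRange start (e + 1) 1).foldl
      (fun acc key =>
        let curr := (PySem.List.pyGet? acc ((acc.length : Int) - 1)).getD 0
        let curr := if PySem.Dict.contains d key
                    then curr + (PySem.Dict.get? d key).getD 0
                    else curr
        acc ++ [curr])
      [start]

-- ===== PORT B =====
-- Source B's loop over the sorted keys: at each key k, total += frequencies[k], then the output
-- is extended by [total] * (nxt - k) where nxt is the next key (or k + 1 at the last key).
-- The lookahead keys[i+1] is the head of the remaining list in this structural recursion.
def pvFill (dct : PySem.Dict Int Int) : Int → List Int → List Int
  | _, [] => []
  | total, k :: rest =>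
    let total := total + (PySem.Dict.get? dct k).getD 0   -- frequencies[k]; k is a key, so present
    let nxt := match rest with
               | [] => k + 1
               | k2 :: _ => k2
    List.replicate (nxt - k).toNat total ++ pvFill dct total rest

def build_cumulative_frequencies_alt (frequencies : List (Int × Int)) : List Int :=
  let dct := PySem.Dict.ofList frequencies
  let keys := PySem.List.sorted (PySem.Dict.keys dct) (fun x => x) false
  match PySem.List.pyGet? keys 0 with
  | none => []        -- Python raises IndexError here (empty dict); excluded by Pre_
  | some start => start :: pvFill dct start keys

-- ===== PRECONDITION & SPEC =====
-- Pre_ excludes exactly the empty dict, on which Python A raises IndexError (keys[0]).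
def Pre_build_cumulative_frequencies (frequencies : List (Int × Int)) : Prop := frequencies ≠ []
instance (frequencies : List (Int × Int)) : Decidable (Pre_build_cumulative_frequencies frequencies) := by unfold Pre_build_cumulative_frequencies; infer_instance
def pvWitness_build_cumulative_frequencies : (List (Int × Int)) := [(3, 2), (5, 1)]

def Spec_build_cumulative_frequencies (frequencies : List (Int × Int)) (out : List Int) : Prop := out = build_cumulative_frequencies_alt frequencies
instance (frequencies : List (Int × Int)) (out : List Int) : Decidable (Spec_build_cumulative_frequencies frequencies out) := by unfold Spec_build_cumulative_frequencies; infer_instance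

-- ===== CLAIM =====
def Claim_equal_build_cumulative_frequencies : Prop := ∀ (frequencies : List (Int × Int)), Dom_build_cumulative_frequencies frequencies → Pre_build_cumulative_frequencies frequencies → Spec_build_cumulative_frequencies frequencies (build_cumulative_frequencies frequencies)

-- ===== LEMMAS AND PROOFS =====

-- Proof-side helpers: running sums of a delta list, and the last of (k :: rest).
def pvRunningSums (total : Int) : List Int -> List Int
  | [] => []
  | d :: ds => (total + d) :: pvRunningSums (total + d) ds

def pvLastD (k : Int) : List Int -> Int
  | [] => k
  | k2 :: rest => pvLastD k2 rest

theorem pvLastD_eq (rest : List Int) : forall (k : Int), pvLastD k rest = ((k :: rest).getLast?).getD 0 := by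
  induction rest with
  | nil => intro k; rfl
  | cons k2 r ih => intro k; simp [pvLastD, ih k2]

theorem pv_le_lastD (rest : List Int) : forall (k : Int), (k :: rest).Pairwise (fun a b => a < b) -> k <= pvLastD k rest := by
  induction rest with
  | nil => intro k _; exact le_refl k
  | cons k2 r ih =>
    intro k hpw
    have hk : k < k2 := (List.pairwise_cons.mp hpw).1 k2 (by simp)
    exact le_of_lt (lt_of_lt_of_le hk (ih k2 (List.pairwise_cons.mp hpw).2))

-- A's loop step with the last element of the accumulator named.
theorem pv_step_last (dct : PySem.Dict Int Int) (pre : List Int) (a key : Int) :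
    (let curr := (PySem.List.pyGet? (pre ++ [a]) (((pre ++ [a]).length : Int) - 1)).getD 0
     let curr := if PySem.Dict.contains dct key
                 then curr + (PySem.Dict.get? dct key).getD 0
                 else curr
     (pre ++ [a]) ++ [curr])
      = (pre ++ [a]) ++ [a + PySem.Dict.getD dct key 0] := by
  have hlast : PySem.List.pyGet? (pre ++ [a]) (((pre ++ [a]).length : Int) - 1) = some a := by
    have : ((pre ++ [a]).length : Int) - 1 = (pre.length : Int) := by simp
    rw [this]
    exact PySem.List.pyGet?_append_length (pre := pre) (y := a) (ys := [])
  simp only [hlast, Option.getD_some]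
  have hgd : PySem.Dict.getD dct key 0 = (PySem.Dict.get? dct key).getD 0 :=
    PySem.Dict.getD_eq_get?_getD dct key 0
  by_cases h : PySem.Dict.contains dct key = true
  · simp [h, hgd]
  · have hnone : PySem.Dict.get? dct key = none := by
      rcases hn : PySem.Dict.get? dct key with _ | v
      · rfl
      · exact absurd (by rw [PySem.Dict.contains_eq_isSome_get?, hn]; rfl) h
    simp [h, hgd, hnone]

-- A's whole loop over any key list equals a prefix plus running sums of the deltas.
theorem pv_foldl_eq_runningSums (dct : PySem.Dict Int Int) (r : List Int) :
    forall (pre : List Int) (a : Int),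
    r.foldl
      (fun acc key =>
        let curr := (PySem.List.pyGet? acc ((acc.length : Int) - 1)).getD 0
        let curr := if PySem.Dict.contains dct key
                    then curr + (PySem.Dict.get? dct key).getD 0
                    else curr
        acc ++ [curr]) (pre ++ [a])
      = pre ++ a :: pvRunningSums a (r.map (fun k => PySem.Dict.getD dct k 0)) := by
  induction r with
  | nil => intro pre a; simp [pvRunningSums]
  | cons key rest ih =>
    intro pre a
    rw [List.foldl_cons]
    rw [show ((let curr := (PySem.List.pyGet? (pre ++ [a]) (((pre ++ [a]).length : Int) - 1)).getD 0
     let curr := if PySem.Dict.contains dct key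
                 then curr + (PySem.Dict.get? dct key).getD 0
                 else curr
     (pre ++ [a]) ++ [curr])) = (pre ++ [a]) ++ [a + PySem.Dict.getD dct key 0] from pv_step_last dct pre a key]
    rw [ih (pre ++ [a]) (a + PySem.Dict.getD dct key 0)]
    simp [pvRunningSums]

theorem pv_runningSums_append (t : Int) (xs ys : List Int) :
    pvRunningSums t (xs ++ ys) = pvRunningSums t xs ++ pvRunningSums (t + xs.sum) ys := by
  induction xs generalizing t with
  | nil => simp [pvRunningSums]
  | cons d ds ih => simp [pvRunningSums, ih, add_assoc]

theorem pv_runningSums_replicate_zero (t : Int) (m : Nat) :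
    pvRunningSums t (List.replicate m 0) = List.replicate m t := by
  induction m generalizing t with
  | zero => rfl
  | succ n ih => simp [List.replicate_succ, pvRunningSums, ih]

-- A zero-valued delta function over a range maps to replicated zeros.
theorem pv_map_zero_range (g : Int -> Int) (a b : Int)
    (h : forall t, a <= t -> t < b -> g t = 0) :
    (PySem.List.pyRange a b 1).map g = List.replicate (b - a).toNat 0 := by
  rw [PySem.List.pyRange_one]
  rw [List.map_map]
  apply List.ext_getElem
  · simp
  · intro i h1 h2
    simp only [List.length_map, List.length_range] at h1
    simp only [List.getElem_map, List.getElem_range, List.getElem_replicate, Function.comp]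
    apply h
    · omega
    · omega

-- Main lemma: A's running-sum over the full integer range equals B's block fill,
-- for a strictly increasing key list whose gaps carry no dict entries.
theorem pv_main (dct : PySem.Dict Int Int) (rest : List Int) :
    forall (k total : Int),
    (k :: rest).Pairwise (fun a b => a < b) ->
    (forall t, k <= t -> t ∉ (k :: rest) -> PySem.Dict.getD dct t 0 = 0) ->
    pvRunningSums total
      ((PySem.List.pyRange k (pvLastD k rest + 1) 1).map (fun x => PySem.Dict.getD dct x 0))
      = pvFill dct total (k :: rest) := by
  induction rest with
  | nil =>
    intro k total _ _
    show pvRunningSums total ((PySem.List.pyRange k (k + 1) 1).map (fun x => PySem.Dict.getD dct x 0))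
       = pvFill dct total [k]
    rw [PySem.List.pyRange_one_singleton]
    simp [pvRunningSums, pvFill, PySem.Dict.getD_eq_get?_getD]
  | cons k2 rest' ih =>
    intro k total hpw hout
    have hk : k < k2 := (List.pairwise_cons.mp hpw).1 k2 (by simp)
    have hrest_pw : (k2 :: rest').Pairwise (fun a b => a < b) := (List.pairwise_cons.mp hpw).2
    have hk2last : k2 <= pvLastD k2 rest' := pv_le_lastD rest' k2 hrest_pw
    show pvRunningSums total
        ((PySem.List.pyRange k (pvLastD k2 rest' + 1) 1).map (fun x => PySem.Dict.getD dct x 0))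
       = pvFill dct total (k :: k2 :: rest')
    rw [PySem.List.pyRange_one_append k k2 (pvLastD k2 rest' + 1) (le_of_lt hk) (by omega)]
    rw [List.map_append, pv_runningSums_append]
    rw [PySem.List.pyRange_one_cons hk, List.map_cons]
    have hz : (PySem.List.pyRange (k + 1) k2 1).map (fun t => PySem.Dict.getD dct t 0)
        = List.replicate (k2 - (k + 1)).toNat 0 := by
      apply pv_map_zero_range
      intro t h1 h2
      apply hout t (by omega)
      intro hmem
      rcases List.mem_cons.mp hmem with h | h
      · omega
      · rcases List.mem_cons.mp h with h' | h'
        · omega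
        · exact absurd (List.rel_of_pairwise_cons hrest_pw h') (by omega)
    rw [hz]
    have hseg : pvRunningSums total (PySem.Dict.getD dct k 0 :: List.replicate (k2 - (k + 1)).toNat 0)
        = List.replicate ((k2 - k).toNat) (total + PySem.Dict.getD dct k 0) := by
      have hcount : (k2 - k).toNat = (k2 - (k + 1)).toNat + 1 := by omega
      rw [hcount, List.replicate_succ]
      simp [pvRunningSums, pv_runningSums_replicate_zero]
    rw [hseg]
    have hsum : (PySem.Dict.getD dct k 0 :: List.replicate (k2 - (k + 1)).toNat 0).sum
        = PySem.Dict.getD dct k 0 := by simp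
    rw [hsum]
    have hih := ih k2 (total + PySem.Dict.getD dct k 0) hrest_pw
      (by
        intro t ht hmem
        apply hout t (by omega)
        intro hmem2
        rcases List.mem_cons.mp hmem2 with h | h
        · omega
        · exact hmem h)
    rw [hih]
    show List.replicate (k2 - k).toNat (total + PySem.Dict.getD dct k 0)
          ++ pvFill dct (total + PySem.Dict.getD dct k 0) (k2 :: rest')
       = pvFill dct total (k :: k2 :: rest')
    rw [show pvFill dct total (k :: k2 :: rest')
          = List.replicate (k2 - k).toNat (total + (PySem.Dict.get? dct k).getD 0)
            ++ pvFill dct (total + (PySem.Dict.get? dct k).getD 0) (k2 :: rest') from rfl]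
    rw [PySem.Dict.getD_eq_get?_getD]

-- A's last-index read keys[len(keys)-1] equals the last element (nonempty list).
theorem pv_idx_last (keys : List Int) (h : keys ≠ []) :
    (PySem.List.pyGet? keys ((keys.length : Int) - 1)).getD 0 = (keys.getLast?).getD 0 := by
  have hlen : 0 < keys.length := List.length_pos_iff.mpr h
  have h2 : ((keys.length : Int) - 1) = ((keys.length - 1 : Nat) : Int) := by omega
  rw [h2, PySem.List.pyGet?_natCast]
  rw [List.getLast?_eq_getElem?]

-- ===== VERDICT =====
theorem build_cumulative_frequencies_spec : Claim_equal_build_cumulative_frequencies := by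
  intro frequencies _ hpre
  unfold Spec_build_cumulative_frequencies
  unfold build_cumulative_frequencies build_cumulative_frequencies_alt
  cases h0 : PySem.List.pyGet? (PySem.List.sorted (PySem.Dict.keys (PySem.Dict.ofList frequencies)) (fun x => x) false) 0 with
  | none => simp [h0]
  | some start =>
    simp only [h0]
    rcases hk : PySem.List.sorted (PySem.Dict.keys (PySem.Dict.ofList frequencies)) (fun x => x) false with _ | ⟨x, tail⟩
    · rw [hk] at h0; simp [PySem.List.pyGet?] at h0
    · have hxs : x = start := by
        rw [hk] at h0
        simpa [PySem.List.pyGet?, PySem.List.pyIdx?] using h0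
      subst hxs
      have hne : (x :: tail) ≠ [] := by simp
      have hpw : (x :: tail).Pairwise (fun a b => a < b) := by
        have hle : (x :: tail).Pairwise (fun a b => a <= b) := by
          have := PySem.List.sorted_pairwise (xs := PySem.Dict.keys (PySem.Dict.ofList frequencies)) (key := fun y => y)
          rw [hk] at this
          simpa using this
        have hnd : (x :: tail).Nodup := by
          have hperm := PySem.List.sorted_perm (xs := PySem.Dict.keys (PySem.Dict.ofList frequencies)) (key := fun y => y) (rev := false)
          rw [hk] at hperm
          exact hperm.nodup_iff.mpr (PySem.Dict.nodup_keys_ofList frequencies)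
        exact hle.imp₂ (fun a b h1 h2 => lt_of_le_of_ne h1 h2) hnd
      have hout : forall t, x <= t -> t ∉ (x :: tail) -> PySem.Dict.getD (PySem.Dict.ofList frequencies) t 0 = 0 := by
        intro t _ hmem
        have hnk : t ∉ PySem.Dict.keys (PySem.Dict.ofList frequencies) := by
          intro hm
          have := (PySem.List.mem_sorted (PySem.Dict.keys (PySem.Dict.ofList frequencies)) (fun y => y) false t).mpr hm
          rw [hk] at this
          exact hmem this
        have hnone : PySem.Dict.get? (PySem.Dict.ofList frequencies) t = none :=
          (PySem.Dict.get?_eq_none_iff_not_mem_keys (PySem.Dict.ofList frequencies) t).mpr hnk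
        rw [PySem.Dict.getD_eq_get?_getD, hnone]; rfl
      rw [pv_idx_last (x :: tail) hne]
      have hlast : ((x :: tail).getLast?).getD 0 = pvLastD x tail := (pvLastD_eq tail x).symm
      rw [hlast]
      have hfold := pv_foldl_eq_runningSums (PySem.Dict.ofList frequencies)
        (PySem.List.pyRange x (pvLastD x tail + 1) 1) [] x
      simp only [List.nil_append] at hfold
      rw [hfold]
      rw [pv_main (PySem.Dict.ofList frequencies) tail x x hpw hout]
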